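-- pv_equiv track=rewrite | github.com/MehulChourasia28/RL-Coursework | study/generate_report.py | get_final_eval
-- ===== SOURCE A (Python) =====
-- def get_final_eval(rows):
--     wr_r = wr_h = None
--     for r in reversed(rows):
--         if wr_r is None and "wr_random" in r:
--             wr_r = r["wr_random"]
--         if wr_h is None and "wr_heuristic" in r:
--             wr_h = r["wr_heuristic"]
--         if wr_r is not None and wr_h is not None:
--             break
--     return wr_r, wr_h
-- ===== SOURCE B (Python) =====
-- def get_final_eval(rows):
--     def last_val(key):
--         return next((r[key] for r in reversed(rows) if key in r), None)
--     return last_val("wr_random"), last_val("wr_heuristic")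
-- ===== Notes on version B (the rewrite author's own statement) =====
-- stated objective: simpler
-- what changed: Replaces the single interleaved reverse loop with mutable state and an early break by two independent short-circuiting reverse searches (next over a generator), one per key.
import Mathlib
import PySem

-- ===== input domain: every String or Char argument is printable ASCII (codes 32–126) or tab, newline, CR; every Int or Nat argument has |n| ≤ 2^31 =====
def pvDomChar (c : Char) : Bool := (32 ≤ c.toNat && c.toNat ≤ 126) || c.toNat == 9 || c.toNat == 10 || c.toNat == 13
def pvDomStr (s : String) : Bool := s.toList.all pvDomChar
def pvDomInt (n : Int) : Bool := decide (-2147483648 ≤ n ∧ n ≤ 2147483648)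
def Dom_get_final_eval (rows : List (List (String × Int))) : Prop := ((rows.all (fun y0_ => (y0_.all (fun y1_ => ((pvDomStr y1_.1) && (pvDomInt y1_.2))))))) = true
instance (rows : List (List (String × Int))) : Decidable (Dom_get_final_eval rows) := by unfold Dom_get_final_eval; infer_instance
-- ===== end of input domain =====

-- B replaces A's single interleaved reverse loop (two state variables, early break)
-- by two independent short-circuiting reverse searches, one per key; objective: simpler.

-- ===== PORT A =====
-- the loop over reversed(rows) with the two state variables and the early break
def pvLoopA : List (List (String × Int)) → Option Int → Option Int → Option Int × Option Int
  | [], wr_r, wr_h => (wr_r, wr_h)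
  | r :: rest, wr_r, wr_h =>
    let wr_r' := match wr_r with
      | none => (PySem.Dict.mk r).get? "wr_random"   -- 'if wr_r is None and "wr_random" in r: wr_r = r["wr_random"]'
      | some v => some v
    let wr_h' := match wr_h with
      | none => (PySem.Dict.mk r).get? "wr_heuristic"
      | some v => some v
    if wr_r'.isSome && wr_h'.isSome then (wr_r', wr_h')   -- break
    else pvLoopA rest wr_r' wr_h'

def get_final_eval (rows : List (List (String × Int))) : Option Int × Option Int :=
  pvLoopA rows.reverse none none

-- ===== PORT B =====
-- last_val(key) = next((r[key] for r in reversed(rows) if key in r), None)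
def pvLastVal (rows : List (List (String × Int))) (key : String) : Option Int :=
  rows.reverse.findSome? (fun r => (PySem.Dict.mk r).get? key)

def get_final_eval_alt (rows : List (List (String × Int))) : Option Int × Option Int :=
  (pvLastVal rows "wr_random", pvLastVal rows "wr_heuristic")

-- ===== PRECONDITION & SPEC =====
def Spec_get_final_eval (rows : List (List (String × Int))) (out : Option Int × Option Int) : Prop := out = get_final_eval_alt rows
instance (rows : List (List (String × Int))) (out : Option Int × Option Int) : Decidable (Spec_get_final_eval rows out) := by unfold Spec_get_final_eval; infer_instance

-- ===== CLAIM (what is proved, stated in full; the proofs are below) =====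
def Claim_equal_get_final_eval : Prop := ∀ (rows : List (List (String × Int))), Dom_get_final_eval rows → Spec_get_final_eval rows (get_final_eval rows)

-- ===== LEMMAS AND PROOFS =====

-- Loop invariant: A's loop over l with accumulators (wr_r, wr_h) returns, componentwise,
-- the accumulator if already found, else the first value found in l.
theorem pvLoopA_eq (l : List (List (String × Int))) :
    ∀ (wr_r wr_h : Option Int),
      pvLoopA l wr_r wr_h =
        (wr_r.or (l.findSome? (fun r => (PySem.Dict.mk r).get? "wr_random")),
         wr_h.or (l.findSome? (fun r => (PySem.Dict.mk r).get? "wr_heuristic"))) := by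
  induction l with
  | nil => intro wr_r wr_h; simp [pvLoopA]
  | cons r rest ih =>
    intro wr_r wr_h
    simp only [pvLoopA, List.findSome?_cons]
    have hr : (match wr_r with
        | none => (PySem.Dict.mk r).get? "wr_random"
        | some v => some v) = wr_r.or ((PySem.Dict.mk r).get? "wr_random") := by
      cases wr_r <;> rfl
    have hh : (match wr_h with
        | none => (PySem.Dict.mk r).get? "wr_heuristic"
        | some v => some v) = wr_h.or ((PySem.Dict.mk r).get? "wr_heuristic") := by
      cases wr_h <;> rfl
    rw [hr, hh]
    split
    · rename_i hboth
      simp only [Bool.and_eq_true, Option.isSome_iff_exists] at hboth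
      obtain ⟨⟨a, ha⟩, ⟨b, hb⟩⟩ := hboth
      cases wr_r <;> cases wr_h <;>
        simp_all [Option.or]
    · rw [ih]
      cases wr_r <;> cases wr_h <;>
        cases hR : (PySem.Dict.mk r).get? "wr_random" <;>
        cases hH : (PySem.Dict.mk r).get? "wr_heuristic" <;>
        simp_all [Option.or]

-- ===== VERDICT (by name: the statement is the Claim_ definition above) =====
theorem get_final_eval_spec : Claim_equal_get_final_eval := by
  intro rows _
  unfold Spec_get_final_eval get_final_eval get_final_eval_alt pvLastVal
  rw [pvLoopA_eq]
  simp [Option.or]
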